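-- pv_equiv track=rewrite | github.com/kmkarakaya/openLLMbenchmark | model_identity.py | split_model_ref
-- ===== SOURCE A (Python) =====
-- CLOUD_SOURCE = "cloud"
--
-- LOCAL_SOURCE = "local"
--
-- SUPPORTED_SOURCES = {CLOUD_SOURCE, LOCAL_SOURCE}
--
-- def normalize_model_source(source: str | None, *, default: str = CLOUD_SOURCE) -> str:
--     candidate = str(source or "").strip().lower()
--     if candidate in SUPPORTED_SOURCES:
--         return candidate
--     return default
--
-- def split_model_ref(value: str, default_source: str = CLOUD_SOURCE) -> tuple[str, str]:
--     raw = str(value or "").strip()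
--     fallback_source = normalize_model_source(default_source)
--     if not raw:
--         return "", fallback_source
--
--     lowered = raw.lower()
--     for source in (CLOUD_SOURCE, LOCAL_SOURCE):
--         suffix = f":{source}"
--         if lowered.endswith(suffix):
--             model_name = raw[: -len(suffix)].strip()
--             if model_name:
--                 return model_name, source
--     return raw, fallback_source
-- ===== SOURCE B (Python) =====
-- CLOUD_SOURCE = "cloud"
-- LOCAL_SOURCE = "local"
-- SUPPORTED_SOURCES = {CLOUD_SOURCE, LOCAL_SOURCE}
--
-- def split_model_ref(value, default_source=CLOUD_SOURCE):
--     raw = str(value or "").strip()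
--     candidate = str(default_source or "").strip().lower()
--     fallback_source = candidate if candidate in SUPPORTED_SOURCES else CLOUD_SOURCE
--     if not raw:
--         return "", fallback_source
--     i = raw.rfind(":")
--     if i >= 0:
--         token = raw[i + 1:].lower()
--         if token in SUPPORTED_SOURCES:
--             model_name = raw[:i].strip()
--             if model_name:
--                 return model_name, token
--     return raw, fallback_source
-- ===== Notes on version B (the rewrite author's own statement) =====
-- stated objective: simpler
-- what changed: B replaces A's loop over the two candidate sources with endswith tests by a single rfind of the last colon: the token after it is lowercased and checked for membership in SUPPORTED_SOURCES once, so there is no per-source suffix loop.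
import Mathlib
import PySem

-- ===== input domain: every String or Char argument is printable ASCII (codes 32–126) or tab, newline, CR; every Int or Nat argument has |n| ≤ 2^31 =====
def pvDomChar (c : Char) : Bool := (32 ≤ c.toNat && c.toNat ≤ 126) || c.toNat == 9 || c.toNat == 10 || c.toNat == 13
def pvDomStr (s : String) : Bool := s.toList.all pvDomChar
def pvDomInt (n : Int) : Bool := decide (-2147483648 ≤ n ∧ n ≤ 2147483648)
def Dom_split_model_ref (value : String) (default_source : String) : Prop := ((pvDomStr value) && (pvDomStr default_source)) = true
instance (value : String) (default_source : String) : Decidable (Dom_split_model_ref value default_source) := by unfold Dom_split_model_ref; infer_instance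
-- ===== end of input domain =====

-- B replaces A's loop over candidate sources with a single rfind-based split at the last colon (objective: simpler decomposition, same cost).

-- ===== PORT A =====
def CLOUD_SOURCE : String := "cloud"
def LOCAL_SOURCE : String := "local"
def SUPPORTED_SOURCES : List String := PySem.Set.ofList [CLOUD_SOURCE, LOCAL_SOURCE]

-- str(source or "") is the identity on str arguments (falsy str is "", and str() of a str is itself)
def normalize_model_source (source : String) (default : String) : String :=
  let candidate := PySem.Str.lower (PySem.Str.strip source)
  if candidate ∈ SUPPORTED_SOURCES then candidate else default

-- the 'for source in (CLOUD_SOURCE, LOCAL_SOURCE)' loop with its early returns; none = fell through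
def split_model_ref_loop (raw lowered : String) : List String → Option (String × String)
  | [] => none
  | source :: rest =>
    let suffix := ":" ++ source
    if PySem.Str.endswith lowered suffix then
      let model_name := PySem.Str.strip (PySem.Str.slice raw none (some (-(PySem.Str.len suffix))))
      if model_name ≠ "" then some (model_name, source)
      else split_model_ref_loop raw lowered rest
    else split_model_ref_loop raw lowered rest

def split_model_ref (value : String) (default_source : String) : String × String :=
  let raw := PySem.Str.strip value
  let fallback_source := normalize_model_source default_source CLOUD_SOURCE
  if raw = "" then ("", fallback_source)
  else
    let lowered := PySem.Str.lower raw
    match split_model_ref_loop raw lowered [CLOUD_SOURCE, LOCAL_SOURCE] with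
    | some res => res
    | none => (raw, fallback_source)

-- ===== PORT B =====
def split_model_ref_alt (value : String) (default_source : String) : String × String :=
  let raw := PySem.Str.strip value
  let candidate := PySem.Str.lower (PySem.Str.strip default_source)
  let fallback_source := if candidate ∈ SUPPORTED_SOURCES then candidate else CLOUD_SOURCE
  if raw = "" then ("", fallback_source)
  else
    let i := PySem.Str.rfind raw ":"
    if 0 ≤ i then
      let token := PySem.Str.lower (PySem.Str.slice raw (some (i + 1)) none)
      if token ∈ SUPPORTED_SOURCES then
        let model_name := PySem.Str.strip (PySem.Str.slice raw none (some i))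
        if model_name ≠ "" then (model_name, token) else (raw, fallback_source)
      else (raw, fallback_source)
    else (raw, fallback_source)

-- ===== PRECONDITION & SPEC =====
def Spec_split_model_ref (value : String) (default_source : String) (out : String × String) : Prop := out = split_model_ref_alt value default_source
instance (value : String) (default_source : String) (out : String × String) : Decidable (Spec_split_model_ref value default_source out) := by unfold Spec_split_model_ref; infer_instance

-- ===== CLAIM (what is proved, stated in full; the proofs are below) =====
def Claim_equal_split_model_ref : Prop := ∀ (value : String) (default_source : String), Dom_split_model_ref value default_source → Spec_split_model_ref value default_source (split_model_ref value default_source)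

-- ===== LEMMAS AND PROOFS =====

theorem lowerChar_colon_iff (c : Char) : PySem.Chars.lowerChar c = ':' ↔ c = ':' := by
  unfold PySem.Chars.lowerChar
  split
  · rename_i h
    simp [PySem.Chars.isupper, Char.le_def, UInt32.le_iff_toNat_le] at h
    have hc : c.toNat = c.val.toNat := rfl
    have hA : ('A' : Char).val.toNat = 65 := by decide
    have hZ : ('Z' : Char).val.toNat = 90 := by decide
    constructor
    · intro he
      have h2 : (Char.ofNat (c.toNat + 32)).toNat = (':' : Char).toNat := by rw [he]
      rw [Char.toNat_ofNat] at h2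
      have hv : (c.toNat + 32).isValidChar := Or.inl (by omega)
      rw [if_pos hv] at h2
      have h58 : (':' : Char).toNat = 58 := by decide
      omega
    · intro he
      subst he
      have h58 : (':' : Char).val.toNat = 58 := by decide
      omega
  · simp

theorem single_prefix (c : Char) (xs : List Char) : [c] <+: xs ↔ xs[0]? = some c := by
  cases xs with
  | nil => simp
  | cons x xs => simp [List.cons_prefix_cons, eq_comm]

theorem prefix_single_drop (l : List Char) (j : Nat) (c : Char) :
    [c].isPrefixOf (l.drop j) = true ↔ l[j]? = some c := by
  rw [List.isPrefixOf_iff_prefix, single_prefix, List.getElem?_drop, Nat.add_zero]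

theorem go_spec (l : List Char) (c : Char) : ∀ n : Nat,
    (PySem.Chars.rfind.go l [c] n = -1 ∧ ∀ j ≤ n, l[j]? ≠ some c) ∨
    (∃ k : Nat, k ≤ n ∧ PySem.Chars.rfind.go l [c] n = (k : Int) ∧ l[k]? = some c ∧
      ∀ j, k < j → j ≤ n → l[j]? ≠ some c)
  | 0 => by
    by_cases h : l[0]? = some c
    · right
      refine ⟨0, le_refl _, ?_, h, by omega⟩
      have hp : [c].isPrefixOf l = true := by
        rw [List.isPrefixOf_iff_prefix, single_prefix]; exact h
      simp [PySem.Chars.rfind.go, hp]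
    · left
      constructor
      · have hp : ¬ ([c].isPrefixOf l = true) := by
          rw [List.isPrefixOf_iff_prefix, single_prefix]; exact h
        simp [PySem.Chars.rfind.go, hp]
      · intro j hj; interval_cases j; exact h
  | n + 1 => by
    by_cases h : l[n+1]? = some c
    · right
      refine ⟨n + 1, le_refl _, ?_, h, by omega⟩
      have hp := (prefix_single_drop l (n+1) c).mpr h
      simp [PySem.Chars.rfind.go, hp]
    · have hp : ¬ ([c].isPrefixOf (l.drop (n+1)) = true) := fun hh => h ((prefix_single_drop l (n+1) c).mp hh)
      have heq : PySem.Chars.rfind.go l [c] (n+1) = PySem.Chars.rfind.go l [c] n := by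
        simp [PySem.Chars.rfind.go, hp]
      rcases go_spec l c n with ⟨h1, h2⟩ | ⟨k, hk, h1, h2, h3⟩
      · left
        refine ⟨heq.trans h1, fun j hj => ?_⟩
        rcases Nat.lt_or_ge j (n+1) with hj' | hj'
        · exact h2 j (by omega)
        · have : j = n + 1 := by omega
          subst this; exact h
      · right
        refine ⟨k, by omega, heq.trans h1, h2, fun j hj1 hj2 => ?_⟩
        rcases Nat.lt_or_ge j (n+1) with hj' | hj'
        · exact h3 j hj1 (by omega)
        · have : j = n + 1 := by omega
          subst this; exact h

theorem lower_getElem? (l : List Char) (j : Nat) :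
    (PySem.Chars.lower l)[j]? = (l[j]?).map PySem.Chars.lowerChar := by
  simp [PySem.Chars.lower]

theorem no_colon_not_suffix (l s : List Char)
    (h : ∀ j ≤ l.length, l[j]? ≠ some ':') : ¬ ((':' :: s) <:+ PySem.Chars.lower l) := by
  intro hsuf
  have hmem : (':' : Char) ∈ PySem.Chars.lower l := hsuf.subset (by simp)
  rcases List.mem_map.mp hmem with ⟨c, hc, hlc⟩
  have hcc : c = ':' := (lowerChar_colon_iff c).mp hlc
  subst hcc
  rcases List.mem_iff_getElem?.mp hc with ⟨j, hj⟩
  exact h j (Nat.le_of_lt (List.getElem?_eq_some_iff.mp hj).1) hj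

theorem ends_iff (l s : List Char) (k : Nat) (hs : (':' : Char) ∉ s)
    (hk : l[k]? = some ':') (hmax : ∀ j, k < j → j ≤ l.length → l[j]? ≠ some ':') :
    ((':' :: s) <:+ PySem.Chars.lower l) ↔ PySem.Chars.lower (l.drop (k+1)) = s := by
  have hkn : k < l.length := (List.getElem?_eq_some_iff.mp hk).1
  constructor
  · intro hsuf
    have hlen : s.length + 1 ≤ l.length := by
      have := hsuf.length_le
      simp [PySem.Chars.lower] at this
      omega
    set m := l.length - (s.length + 1) with hm
    have hdrop : ':' :: s = (PySem.Chars.lower l).drop m := by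
      have := List.suffix_iff_eq_drop.mp hsuf
      simpa [PySem.Chars.lower, hm] using this
    have hml : (PySem.Chars.lower l)[m]? = some ':' := by
      have h0 : ((PySem.Chars.lower l).drop m)[0]? = some ':' := by rw [← hdrop]; rfl
      rwa [List.getElem?_drop, Nat.add_zero] at h0
    have hlm : l[m]? = some ':' := by
      rw [lower_getElem?] at hml
      rcases hx : l[m]? with _ | c
      · simp [hx] at hml
      · simp [hx] at hml
        have hcc : c = ':' := (lowerChar_colon_iff c).mp hml
        simp [hcc]
    have hmk : m ≤ k := by
      by_contra hcon
      exact hmax m (by omega) (by omega) hlm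
    have hkm : m = k := by
      by_contra hne
      have hlt : m < k := by omega
      -- position k lies inside s, but l[k] = ':' lowers to ':' ∈ s
      have h1 : (PySem.Chars.lower l)[k]? = some ':' := by
        rw [lower_getElem?, hk]; simp [lowerChar_colon_iff]
      have h2 : ((PySem.Chars.lower l).drop m)[k - m]? = some ':' := by
        rw [List.getElem?_drop]
        have : m + (k - m) = k := by omega
        rw [this]; exact h1
      rw [← hdrop] at h2
      have hkm1 : k - m = (k - m - 1) + 1 := by omega
      rw [hkm1] at h2
      simp at h2
      exact hs (List.mem_iff_getElem?.mpr ⟨k - m - 1, h2⟩)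
    subst hkm
    have : l.drop m = ':' :: l.drop (m + 1) := by
      have := List.drop_eq_getElem_cons hkn
      rwa [(List.getElem?_eq_some_iff.mp hlm).2] at this
    have h4 : (PySem.Chars.lower l).drop m = PySem.Chars.lower (l.drop m) := by
      simp [PySem.Chars.lower, List.map_drop]
    rw [h4, this] at hdrop
    have htail := congrArg List.tail hdrop
    simpa [PySem.Chars.lower] using htail.symm
  · intro htl
    have hdk : l.drop k = ':' :: l.drop (k + 1) := by
      have := List.drop_eq_getElem_cons hkn
      rwa [(List.getElem?_eq_some_iff.mp hk).2] at this
    have : (PySem.Chars.lower l).drop k = ':' :: s := by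
      rw [show (PySem.Chars.lower l).drop k = PySem.Chars.lower (l.drop k) by
            simp [PySem.Chars.lower, List.map_drop],
          hdk]
      simp only [PySem.Chars.lower, List.map_cons]
      rw [show PySem.Chars.lowerChar ':' = ':' from (lowerChar_colon_iff ':').mpr rfl]
      rw [show List.map PySem.Chars.lowerChar (l.drop (k+1)) = s from htl]
    rw [← this]
    exact List.drop_suffix _ _

theorem branch_eq (raw fb : String) :
    (match split_model_ref_loop raw (PySem.Str.lower raw) [CLOUD_SOURCE, LOCAL_SOURCE] with
      | some res => res
      | none => (raw, fb)) =
    (if 0 ≤ PySem.Str.rfind raw ":" then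
      if PySem.Str.lower (PySem.Str.slice raw (some (PySem.Str.rfind raw ":" + 1)) none) ∈ SUPPORTED_SOURCES then
        if PySem.Str.strip (PySem.Str.slice raw none (some (PySem.Str.rfind raw ":"))) ≠ "" then
          (PySem.Str.strip (PySem.Str.slice raw none (some (PySem.Str.rfind raw ":"))),
           PySem.Str.lower (PySem.Str.slice raw (some (PySem.Str.rfind raw ":" + 1)) none))
        else (raw, fb)
      else (raw, fb)
    else (raw, fb)) := by
  have hr : PySem.Str.rfind raw ":" = PySem.Chars.rfind.go raw.toList [':'] raw.toList.length := rfl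
  rcases go_spec raw.toList ':' raw.toList.length with ⟨h1, h2⟩ | ⟨k, hkn, h1, h2, h3⟩
  · -- no colon anywhere: both sides fall back
    have hK : PySem.Str.rfind raw ":" = -1 := hr.trans h1
    rw [hK]
    rw [if_neg (by norm_num)]
    have hcl : PySem.Chars.endswith (PySem.Chars.lower raw.toList) (':' :: CLOUD_SOURCE.toList) = false := by
      rw [Bool.eq_false_iff]
      intro h
      exact no_colon_not_suffix raw.toList CLOUD_SOURCE.toList h2 ((PySem.Chars.endswith_iff _ _).mp h)
    have hlo : PySem.Chars.endswith (PySem.Chars.lower raw.toList) (':' :: LOCAL_SOURCE.toList) = false := by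
      rw [Bool.eq_false_iff]
      intro h
      exact no_colon_not_suffix raw.toList LOCAL_SOURCE.toList h2 ((PySem.Chars.endswith_iff _ _).mp h)
    simp [split_model_ref_loop, hcl, hlo]
  · -- colon found: k is the index of the LAST colon
    have hK : PySem.Str.rfind raw ":" = (k : Int) := hr.trans h1
    have hkn2 : k < raw.toList.length := (List.getElem?_eq_some_iff.mp h2).1
    rw [hK, if_pos (by positivity)]
    have hslice1 : PySem.Str.slice raw (some ((k : Int) + 1)) none
        = String.ofList (raw.toList.drop (k + 1)) := by
      unfold PySem.Str.slice
      congr 1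
      rw [PySem.Chars.slice_eq_listSlice,
          show ((k : Int) + 1) = (((k + 1 : Nat)) : Int) by push_cast; ring,
          PySem.List.slice_from _ (by positivity)]
      simp
    have htok : PySem.Str.lower (PySem.Str.slice raw (some ((k : Int) + 1)) none)
        = String.ofList (PySem.Chars.lower (raw.toList.drop (k + 1))) := by
      rw [hslice1]
      unfold PySem.Str.lower
      congr 1
      simp
    have hss : SUPPORTED_SOURCES = [CLOUD_SOURCE, LOCAL_SOURCE] := rfl
    by_cases htc : PySem.Chars.lower (raw.toList.drop (k + 1)) = "cloud".toList
    · -- last segment lowers to "cloud"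
      have hlen5 : raw.toList.length = k + 6 := by
        have := congrArg List.length htc
        simp [PySem.Chars.lower] at this
        have hL : raw.toList.length = raw.length := by simp
        omega
      have hendc : PySem.Chars.endswith (PySem.Chars.lower raw.toList) (':' :: CLOUD_SOURCE.toList) = true := by
        rw [(PySem.Chars.endswith_iff _ _)]
        exact (ends_iff raw.toList CLOUD_SOURCE.toList k (by decide) h2 h3).mpr htc
      have hendl : PySem.Chars.endswith (PySem.Chars.lower raw.toList) (':' :: LOCAL_SOURCE.toList) = false := by
        rw [Bool.eq_false_iff, Ne, (PySem.Chars.endswith_iff _ _)]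
        rw [ends_iff raw.toList LOCAL_SOURCE.toList k (by decide) h2 h3, htc]
        decide
      have htokc : PySem.Str.lower (PySem.Str.slice raw (some ((k : Int) + 1)) none) = CLOUD_SOURCE := by
        rw [htok, htc]; rfl
      have hsliceA : PySem.Str.slice raw none (some (-1 + -((CLOUD_SOURCE.length : Int)))) = PySem.Str.slice raw none (some ((k : Int))) := by
        unfold PySem.Str.slice
        congr 1
        rw [PySem.Chars.slice_eq_listSlice, PySem.Chars.slice_eq_listSlice]
        rw [show (-1 + -((CLOUD_SOURCE.length : Int))) = -(6 : Int) by decide]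
        rw [PySem.List.slice_to_neg_ofNat _ 6 (by omega), PySem.List.slice_to _ (by positivity)]
        have hL : raw.toList.length = raw.length := by simp
        congr 1
        omega
      by_cases hmn : PySem.Str.strip (PySem.Str.slice raw none (some ((k : Int)))) = "" <;>
        simp [split_model_ref_loop, hendc, hendl, htokc, hsliceA, hss, hmn]
    · by_cases htl2 : PySem.Chars.lower (raw.toList.drop (k + 1)) = "local".toList
      · -- last segment lowers to "local"
        have hlen5 : raw.toList.length = k + 6 := by
          have := congrArg List.length htl2
          simp [PySem.Chars.lower] at this
          have hL : raw.toList.length = raw.length := by simp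
          omega
        have hendc : PySem.Chars.endswith (PySem.Chars.lower raw.toList) (':' :: CLOUD_SOURCE.toList) = false := by
          rw [Bool.eq_false_iff, Ne, (PySem.Chars.endswith_iff _ _)]
          rw [ends_iff raw.toList CLOUD_SOURCE.toList k (by decide) h2 h3, htl2]
          decide
        have hendl : PySem.Chars.endswith (PySem.Chars.lower raw.toList) (':' :: LOCAL_SOURCE.toList) = true := by
          rw [(PySem.Chars.endswith_iff _ _)]
          exact (ends_iff raw.toList LOCAL_SOURCE.toList k (by decide) h2 h3).mpr htl2
        have htokl : PySem.Str.lower (PySem.Str.slice raw (some ((k : Int) + 1)) none) = LOCAL_SOURCE := by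
          rw [htok, htl2]; rfl
        have hsliceA : PySem.Str.slice raw none (some (-1 + -((LOCAL_SOURCE.length : Int)))) = PySem.Str.slice raw none (some ((k : Int))) := by
          unfold PySem.Str.slice
          congr 1
          rw [PySem.Chars.slice_eq_listSlice, PySem.Chars.slice_eq_listSlice]
          rw [show (-1 + -((LOCAL_SOURCE.length : Int))) = -(6 : Int) by decide]
          rw [PySem.List.slice_to_neg_ofNat _ 6 (by omega), PySem.List.slice_to _ (by positivity)]
          have hL : raw.toList.length = raw.length := by simp
          congr 1
          omega
        by_cases hmn : PySem.Str.strip (PySem.Str.slice raw none (some ((k : Int)))) = "" <;>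
          simp [split_model_ref_loop, hendc, hendl, htokl, hsliceA, hss, hmn]
      · -- last segment is neither source: both fall back
        have hendc : PySem.Chars.endswith (PySem.Chars.lower raw.toList) (':' :: CLOUD_SOURCE.toList) = false := by
          rw [Bool.eq_false_iff, Ne, (PySem.Chars.endswith_iff _ _)]
          rw [ends_iff raw.toList CLOUD_SOURCE.toList k (by decide) h2 h3]
          exact htc
        have hendl : PySem.Chars.endswith (PySem.Chars.lower raw.toList) (':' :: LOCAL_SOURCE.toList) = false := by
          rw [Bool.eq_false_iff, Ne, (PySem.Chars.endswith_iff _ _)]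
          rw [ends_iff raw.toList LOCAL_SOURCE.toList k (by decide) h2 h3]
          exact htl2
        have hmem : ¬ (PySem.Str.lower (PySem.Str.slice raw (some ((k : Int) + 1)) none) ∈ SUPPORTED_SOURCES) := by
          rw [hss, htok]
          intro hm
          rcases List.mem_cons.mp hm with hcl | hm2
          · exact htc (by simpa using congrArg String.toList hcl)
          · rcases List.mem_cons.mp hm2 with hlo | hn
            · exact htl2 (by simpa using congrArg String.toList hlo)
            · simp at hn
        rw [if_neg hmem]
        simp [split_model_ref_loop, hendc, hendl]

-- ===== VERDICT (by name: the statement is the Claim_ definition above) =====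
theorem split_model_ref_spec : Claim_equal_split_model_ref := by
  intro value default_source _
  show split_model_ref value default_source = split_model_ref_alt value default_source
  have hA : split_model_ref value default_source =
      (if PySem.Str.strip value = "" then ("", normalize_model_source default_source CLOUD_SOURCE)
       else match split_model_ref_loop (PySem.Str.strip value)
              (PySem.Str.lower (PySem.Str.strip value)) [CLOUD_SOURCE, LOCAL_SOURCE] with
         | some res => res
         | none => (PySem.Str.strip value, normalize_model_source default_source CLOUD_SOURCE)) := rfl
  have hB : split_model_ref_alt value default_source =
      (if PySem.Str.strip value = "" then ("", normalize_model_source default_source CLOUD_SOURCE)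
       else
        if 0 ≤ PySem.Str.rfind (PySem.Str.strip value) ":" then
          if PySem.Str.lower (PySem.Str.slice (PySem.Str.strip value) (some (PySem.Str.rfind (PySem.Str.strip value) ":" + 1)) none) ∈ SUPPORTED_SOURCES then
            if PySem.Str.strip (PySem.Str.slice (PySem.Str.strip value) none (some (PySem.Str.rfind (PySem.Str.strip value) ":"))) ≠ "" then
              (PySem.Str.strip (PySem.Str.slice (PySem.Str.strip value) none (some (PySem.Str.rfind (PySem.Str.strip value) ":"))),
               PySem.Str.lower (PySem.Str.slice (PySem.Str.strip value) (some (PySem.Str.rfind (PySem.Str.strip value) ":" + 1)) none))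
            else (PySem.Str.strip value, normalize_model_source default_source CLOUD_SOURCE)
          else (PySem.Str.strip value, normalize_model_source default_source CLOUD_SOURCE)
        else (PySem.Str.strip value, normalize_model_source default_source CLOUD_SOURCE)) := rfl
  rw [hA, hB]
  by_cases hraw : PySem.Str.strip value = ""
  · rw [if_pos hraw, if_pos hraw]
  · rw [if_neg hraw, if_neg hraw]
    exact branch_eq (PySem.Str.strip value) (normalize_model_source default_source CLOUD_SOURCE)
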